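-- pv_equiv track=rewrite | github.com/MrBrantCode/unitest_baseline | mut_generate/mist_train_taco/taco_8125/solution.py | calculate_max_gross_love_value
-- ===== SOURCE A (Python) =====
-- def calculate_max_gross_love_value(N, love_values, decrement_values):
--     # Helper function to calculate the sum of love values
--     def sum_love_values(lst, n):
--         res = 0
--         for i in range(n):
--             res += lst[i][0]
--         return res
--
--     # Helper function to update the love values after each step
--     def update_love_values(lst, k, n):
--         for i in range(k, n):
--             lst[i][0] -= (lst[i][1] * lst[i][2])
--
--     # Create a list of tuples containing love value, decrement value, and index
--     lst = []
--     for i in range(N):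
--         lst.append([love_values[i], decrement_values[i], i])
--
--     # Sort the list based on the decrement value times index in descending order
--     lst.sort(key=lambda x: -(x[1] * x[2]))
--
--     # Calculate the maximum gross love value
--     max_gross_love_value = 0
--     for i in range(N):
--         max_gross_love_value += sum_love_values(lst, N)
--         update_love_values(lst, i + 1, N)
--
--     return max_gross_love_value
-- ===== SOURCE B (Python) =====
-- def calculate_max_gross_love_value(N, love_values, decrement_values):
--     total_love = sum(love_values[i] for i in range(N))
--     costs = sorted([decrement_values[i] * i for i in range(N)], reverse=True)
--     result = N * total_love
--     for p, c in enumerate(costs):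
--         result -= c * (p * (p + 1) // 2 + (N - 1 - p) * p)
--     return result
-- ===== Notes on version B (the rewrite author's own statement) =====
-- stated objective: faster
-- what changed: A runs N rounds, each summing all N love values and decrementing a suffix (O(N^2)); B sorts the costs d_i*i once and computes the answer in one pass as N*sum(love) minus each sorted cost times a closed-form coefficient p*(p+1)//2 + (N-1-p)*p.
import Mathlib
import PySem

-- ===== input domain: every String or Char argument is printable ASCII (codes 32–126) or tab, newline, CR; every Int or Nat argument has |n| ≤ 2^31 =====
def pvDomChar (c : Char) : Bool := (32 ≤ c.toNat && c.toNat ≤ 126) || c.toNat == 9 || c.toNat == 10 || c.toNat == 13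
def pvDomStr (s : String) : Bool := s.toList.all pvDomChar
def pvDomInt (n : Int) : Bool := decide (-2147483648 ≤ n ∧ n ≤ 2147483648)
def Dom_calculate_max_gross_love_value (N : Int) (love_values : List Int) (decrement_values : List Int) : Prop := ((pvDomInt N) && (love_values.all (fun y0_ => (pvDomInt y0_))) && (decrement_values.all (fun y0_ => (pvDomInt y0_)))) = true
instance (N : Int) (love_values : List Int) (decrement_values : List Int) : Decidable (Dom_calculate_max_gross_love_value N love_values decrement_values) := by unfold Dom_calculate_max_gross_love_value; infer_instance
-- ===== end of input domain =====

-- B replaces A's N rounds of summing-and-decrementing (O(N^2)) by sorting the costs d_i*i once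
-- and adding each sorted position's total contribution through a closed arithmetic formula.

-- ===== PORT A =====
def pvSumLoveA (lst : List (Int × Int × Int)) (n : Int) : Int :=
  (PySem.List.pyRange 0 n).foldl (fun res i => res + (PySem.List.pyGetD lst i (0, 0, 0)).1) 0

def pvUpdateA (lst : List (Int × Int × Int)) (k n : Int) : List (Int × Int × Int) :=
  (PySem.List.pyRange k n).foldl
    (fun l i =>
      let x := PySem.List.pyGetD l i (0, 0, 0)
      l.set i.toNat (x.1 - x.2.1 * x.2.2, x.2.1, x.2.2)) lst

def calculate_max_gross_love_value (N : Int) (love_values : List Int) (decrement_values : List Int) : Int :=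
  let lst0 := (PySem.List.pyRange 0 N).foldl
      (fun acc i => acc ++ [(PySem.List.pyGetD love_values i 0, PySem.List.pyGetD decrement_values i 0, i)]) []
  let lst := PySem.List.sorted lst0 (fun x => -(x.2.1 * x.2.2))
  let r := (PySem.List.pyRange 0 N).foldl
      (fun st i => (st.1 + pvSumLoveA st.2 N, pvUpdateA st.2 (i + 1) N)) ((0 : Int), lst)
  r.1

-- ===== PORT B =====
def calculate_max_gross_love_value_alt (N : Int) (love_values : List Int) (decrement_values : List Int) : Int :=
  let total_love := (PySem.List.pyRange 0 N).foldl (fun s i => s + PySem.List.pyGetD love_values i 0) 0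
  let costs := PySem.List.sorted
      ((PySem.List.pyRange 0 N).map (fun i => PySem.List.pyGetD decrement_values i 0 * i))
      (fun x => x) true
  (PySem.List.enumerate costs).foldl
    (fun r pc =>
      r - pc.2 * (PySem.Int.floordiv (pc.1 * (pc.1 + 1)) 2 + (N - 1 - pc.1) * pc.1))
    (N * total_love)

-- ===== PRECONDITION & SPEC =====
-- Pre_ excludes exactly the inputs where Python A raises IndexError: N larger than either list.
def Pre_calculate_max_gross_love_value (N : Int) (love_values : List Int) (decrement_values : List Int) : Prop :=
  N ≤ (love_values.length : Int) ∧ N ≤ (decrement_values.length : Int)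
instance (N : Int) (love_values : List Int) (decrement_values : List Int) : Decidable (Pre_calculate_max_gross_love_value N love_values decrement_values) := by unfold Pre_calculate_max_gross_love_value; infer_instance

def pvWitness_calculate_max_gross_love_value : Int × List Int × List Int := (3, [5, 2, 7], [1, 3, 2])

def Spec_calculate_max_gross_love_value (N : Int) (love_values : List Int) (decrement_values : List Int) (out : Int) : Prop := out = calculate_max_gross_love_value_alt N love_values decrement_values
instance (N : Int) (love_values : List Int) (decrement_values : List Int) (out : Int) : Decidable (Spec_calculate_max_gross_love_value N love_values decrement_values out) := by unfold Spec_calculate_max_gross_love_value; infer_instance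

-- ===== CLAIM (what is proved, stated in full; the proofs are below) =====
def Claim_equal_calculate_max_gross_love_value : Prop := ∀ (N : Int) (love_values : List Int) (decrement_values : List Int), Dom_calculate_max_gross_love_value N love_values decrement_values → Pre_calculate_max_gross_love_value N love_values decrement_values → Spec_calculate_max_gross_love_value N love_values decrement_values (calculate_max_gross_love_value N love_values decrement_values)

-- ===== LEMMAS AND PROOFS =====

-- proof-only helpers
def pvDec (x : Int × Int × Int) : Int × Int × Int := (x.1 - x.2.1 * x.2.2, x.2.1, x.2.2)
def pvC (x : Int × Int × Int) : Int := x.2.1 * x.2.2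
def pvSumF (L : List (Int × Int × Int)) : Int := (L.map (fun x => x.1)).sum
def pvCw : Nat → List Int → Int
  | 0, _ => 0
  | _ + 1, [] => 0
  | m + 1, _ :: zs => (m : Int) * zs.sum + pvCw m zs
def pvOff (n : Nat) : Nat → Int
  | 0 => 0
  | p + 1 => pvOff n p + ((n : Int) - 1 - (p : Int))

lemma pvRange_nil (a b : Int) (h : b ≤ a) : PySem.List.pyRange a b = [] := by
  simp only [PySem.List.pyRange]; norm_num; intro h'; omega

lemma pvSum_sub (l : List (Int × Int × Int)) :
    (l.map (fun x => x.1 - x.2.1 * x.2.2)).sum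
      = (l.map (fun x => x.1)).sum - (l.map (fun x => x.2.1 * x.2.2)).sum := by
  induction l with
  | nil => simp
  | cons y ys ih => simp [ih]; ring

lemma pvCw_nil (m : Nat) : pvCw m [] = 0 := by cases m <;> rfl

lemma pvSumLove_eq (L : List (Int × Int × Int)) :
    pvSumLoveA L (L.length : Int) = pvSumF L := by
  unfold pvSumLoveA
  have h : (L.length : Int) = PySem.List.len L := by simp [PySem.List.len]
  rw [h, PySem.List.foldl_pyRange_pyGetD L (0,0,0) (fun acc x => acc + x.1) 0 le_rfl]
  simp [PySem.List.foldl_add, pvSumF]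

lemma pvUpdate_eq (d : Nat) : ∀ (L : List (Int × Int × Int)) (k : Nat), L.length = k + d →
    pvUpdateA L (k : Int) (L.length : Int) = L.take k ++ (L.drop k).map pvDec := by
  induction d with
  | zero =>
    intro L k h
    unfold pvUpdateA
    rw [pvRange_nil _ _ (by omega)]
    rw [List.take_of_length_le (by omega), List.drop_of_length_le (by omega)]
    simp
  | succ d ih =>
    intro L k h
    have hk : k < L.length := by omega
    unfold pvUpdateA
    rw [PySem.List.pyRange_one_cons (by exact_mod_cast hk)]
    simp only [List.foldl_cons]
    have hget : PySem.List.pyGetD L (k : Int) (0,0,0) = L[k] := by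
      rw [PySem.List.pyGetD_natCast, List.getD_eq_getElem?_getD, List.getElem?_eq_getElem hk]
      rfl
    rw [hget]
    have hset : L.set (Int.toNat (k : Int)) (L[k].1 - L[k].2.1 * L[k].2.2, L[k].2.1, L[k].2.2)
        = L.take k ++ pvDec L[k] :: L.drop (k + 1) := by
      rw [List.set_eq_take_append_cons_drop]
      simp [hk, pvDec]
    rw [hset]
    set L' : List (Int × Int × Int) := L.take k ++ pvDec L[k] :: L.drop (k + 1) with hL'
    have hlen' : L'.length = L.length := by simp [hL']; omega
    have hcast : (k : Int) + 1 = ((k + 1 : Nat) : Int) := by push_cast; ring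
    have hih := ih L' (k + 1) (by omega)
    unfold pvUpdateA at hih
    rw [hcast, ← hlen', hih]
    have htk : L'.take (k + 1) = L.take k ++ [pvDec L[k]] := by
      simp [hL', List.take_append, List.length_take, Nat.min_eq_left (le_of_lt hk)]
    have hdr : L'.drop (k + 1) = L.drop (k + 1) := by
      simp [hL', List.drop_append, List.length_take, Nat.min_eq_left (le_of_lt hk)]
    rw [htk, hdr]
    have hdk : L.drop k = L[k] :: L.drop (k + 1) := List.drop_eq_getElem_cons hk
    rw [hdk]
    simp only [List.map_cons, List.append_assoc, List.singleton_append, List.map_drop]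

lemma pvMainA (n : Nat) : ∀ (m i : Nat) (a : Int) (L : List (Int × Int × Int)),
    L.length = n → i + m = n →
    ((PySem.List.pyRange (i : Int) (n : Int)).foldl
        (fun st j => (st.1 + pvSumLoveA st.2 (n : Int), pvUpdateA st.2 (j + 1) (n : Int)))
        (a, L)).1
      = a + (m : Int) * pvSumF (L.take i)
        + ((m : Int) * pvSumF (L.drop i) - pvCw m ((L.drop i).map pvC)) := by
  intro m
  induction m with
  | zero =>
    intro i a L hL hi
    rw [pvRange_nil _ _ (by omega)]
    simp [pvCw]
  | succ m ih =>
    intro i a L hL hi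
    have hik : i < n := by omega
    rw [PySem.List.pyRange_one_cons (by exact_mod_cast hik)]
    simp only [List.foldl_cons]
    have hsum : pvSumLoveA L (n : Int) = pvSumF L := by
      rw [← hL]; exact_mod_cast pvSumLove_eq L
    have hcast : (i : Int) + 1 = ((i + 1 : Nat) : Int) := by push_cast; ring
    have hupd : pvUpdateA L ((i : Int) + 1) (n : Int) =
        L.take (i + 1) ++ (L.drop (i + 1)).map pvDec := by
      rw [hcast, ← hL]
      exact_mod_cast pvUpdate_eq (n - (i + 1)) L (i + 1) (by omega)
    rw [hsum, hupd]
    set L' : List (Int × Int × Int) := L.take (i + 1) ++ (L.drop (i + 1)).map pvDec with hL'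
    have hlen' : L'.length = n := by simp [hL']; omega
    have := ih (i + 1) (a + pvSumF L) L' hlen' (by omega)
    rw [hcast, this]
    have hlenA : (L.take (i + 1)).length = i + 1 := by rw [List.length_take]; omega
    have htk : L'.take (i + 1) = L.take (i + 1) := by
      rw [hL', List.take_append, hlenA, Nat.sub_self, List.take_zero, List.append_nil,
        List.take_of_length_le (le_of_eq hlenA)]
    have hdr : L'.drop (i + 1) = (L.drop (i + 1)).map pvDec := by
      rw [hL', List.drop_append, hlenA, Nat.sub_self, List.drop_zero,
        List.drop_of_length_le (le_of_eq hlenA), List.nil_append]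
    have hdk : L.drop i = L[i] :: L.drop (i + 1) := List.drop_eq_getElem_cons (by omega)
    have htk1 : L.take (i + 1) = L.take i ++ [L[i]] := by
      rw [List.take_add_one]
      simp [List.getElem?_eq_getElem (by omega : i < L.length)]
    have hsplit : (L.map (fun x => x.1)).sum
        = (List.map (fun x => x.1) (L.take i)).sum
          + (L[i].1 + (List.map (fun x => x.1) (L.drop (i + 1))).sum) := by
      conv_lhs => rw [← List.take_append_drop i L]
      rw [List.map_append, List.sum_append, hdk, List.map_cons, List.sum_cons]
    rw [htk, hdr, htk1, hdk]
    simp only [pvSumF, pvDec, pvC, List.map_append, List.map_cons, List.map_nil,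
      List.sum_append, List.sum_cons, List.sum_nil, List.map_map, Function.comp_def, pvCw]
    rw [pvSum_sub (L.drop (i + 1))]
    rw [show (pvC : Int × Int × Int → Int) = (fun x : Int × Int × Int => x.2.1 * x.2.2) from rfl]
    rw [hsplit]
    push_cast
    ring

lemma pvTOff (n : Nat) (p : Nat) :
    PySem.Int.floordiv ((p : Int) * ((p : Int) + 1)) 2 + ((n : Int) - 1 - (p : Int)) * (p : Int)
      = pvOff n p := by
  induction p with
  | zero => simp [pvOff, PySem.Int.floordiv]
  | succ p ih =>
    have hc : ((p : Int) + 1) * (((p : Int) + 1) + 1) = (((p + 1) * (p + 2) : Nat) : Int) := by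
      push_cast; ring
    have hc2 : (p : Int) * ((p : Int) + 1) = (((p * (p + 1)) : Nat) : Int) := by push_cast; ring
    have hfd : PySem.Int.floordiv (((p + 1 : Nat) : Int) * (((p + 1 : Nat) : Int) + 1)) 2
        = PySem.Int.floordiv ((p : Int) * ((p : Int) + 1)) 2 + ((p : Int) + 1) := by
      push_cast
      rw [hc, hc2, show ((2 : Int)) = ((2 : Nat) : Int) from rfl,
        PySem.Int.floordiv_natCast, PySem.Int.floordiv_natCast]
      have h2 : (p + 1) * (p + 2) = p * (p + 1) + 2 * (p + 1) := by ring
      have h3 : (p + 1) * (p + 2) / 2 = p * (p + 1) / 2 + (p + 1) := by omega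
      rw [h3]
      push_cast
      ring
    rw [pvOff, ← ih, hfd]
    push_cast
    ring

lemma pvEnumB (n : Nat) : ∀ (zs : List Int) (p0 : Nat) (acc : Int), p0 + zs.length = n →
    (PySem.List.enumerate zs (p0 : Int)).foldl
        (fun r pc => r - pc.2 * (PySem.Int.floordiv (pc.1 * (pc.1 + 1)) 2 + ((n : Int) - 1 - pc.1) * pc.1))
        acc
      = acc - pvCw (n - p0) zs - pvOff n p0 * zs.sum := by
  intro zs
  induction zs with
  | nil => intro p0 acc h; simp [PySem.List.enumerate, pvCw_nil]
  | cons z zs ih =>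
    intro p0 acc h
    have hlt : p0 < n := by simp at h; omega
    simp only [PySem.List.enumerate, List.foldl_cons]
    rw [pvTOff n p0]
    have hcast : (p0 : Int) + 1 = ((p0 + 1 : Nat) : Int) := by push_cast; ring
    rw [hcast, ih (p0 + 1) _ (by simp at h ⊢; omega)]
    have hn : n - p0 = (n - (p0 + 1)) + 1 := by omega
    rw [hn, pvCw]
    have hoff : pvOff n (p0 + 1) = pvOff n p0 + ((n : Int) - 1 - (p0 : Int)) := rfl
    rw [hoff]
    have hm : ((n - (p0 + 1) : Nat) : Int) = (n : Int) - (p0 : Int) - 1 := by omega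
    rw [hm]
    simp only [List.sum_cons]
    ring

lemma pvBridge (lst : List (Int × Int × Int)) :
    (PySem.List.sorted lst (fun x => -(x.2.1 * x.2.2))).map pvC
      = PySem.List.sorted (lst.map pvC) (fun x => x) true := by
  apply List.Perm.eq_of_pairwise (le := fun a b : Int => b ≤ a)
  · intro a b _ _ h1 h2; omega
  · exact List.Pairwise.map pvC (fun a b h => by simp [pvC] at *; omega)
      (PySem.List.sorted_pairwise lst (fun x => -(x.2.1 * x.2.2)))
  · exact PySem.List.sorted_pairwise_rev (lst.map pvC) (fun x => x)
  · exact ((PySem.List.sorted_perm lst _ false).map pvC).trans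
      (PySem.List.sorted_perm (lst.map pvC) _ true).symm

-- ===== VERDICT (by name: the statement is the Claim_ definition above) =====
theorem calculate_max_gross_love_value_spec : Claim_equal_calculate_max_gross_love_value := by
  intro N lv dv hdom hpre
  unfold Spec_calculate_max_gross_love_value
  obtain ⟨hp1, hp2⟩ := hpre
  by_cases hneg : N ≤ 0
  · have h0 : PySem.List.pyRange 0 N = [] := pvRange_nil 0 N hneg
    simp [calculate_max_gross_love_value, calculate_max_gross_love_value_alt, h0,
      PySem.List.sorted]
  · have hneg : 0 < N := by omega
    have hN : N = (N.toNat : Int) := by omega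
    set n := N.toNat with hn
    rw [hN]
    have hn1 : n ≤ lv.length := by omega
    have hn2 : n ≤ dv.length := by omega
    simp only [calculate_max_gross_love_value, calculate_max_gross_love_value_alt]
    rw [PySem.List.pyRange_zero_natCast n]
    simp only [PySem.List.foldl_append_singleton_eq_map, List.nil_append, List.map_map,
      Function.comp_def, PySem.List.pyGetD_natCast, List.foldl_map]
    set G : Nat → Int × Int × Int := fun k => (lv.getD k 0, dv.getD k 0, (k : Int)) with hG
    set L0 := PySem.List.sorted ((List.range n).map G) (fun x => -(x.2.1 * x.2.2)) with hL0
    have hlenL0 : L0.length = n := by rw [hL0, PySem.List.length_sorted]; simp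
    have hA := pvMainA n n 0 0 L0 hlenL0 (by omega)
    simp only [Nat.cast_zero, List.take_zero, List.drop_zero] at hA
    rw [PySem.List.pyRange_zero_natCast n, List.foldl_map] at hA
    rw [hA]
    have htot : List.foldl (fun x y => x + lv.getD y 0) 0 (List.range n) = pvSumF L0 := by
      rw [PySem.List.foldl_add, zero_add]
      have h := ((PySem.List.sorted_perm ((List.range n).map G)
        (fun x => -(x.2.1 * x.2.2)) false).map (fun x : Int × Int × Int => x.1)).sum_eq
      simp only [pvSumF, hL0]
      rw [h, List.map_map]
      rfl
    rw [htot]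
    have hcost : PySem.List.sorted (List.map (fun x => dv.getD x 0 * (x : Int)) (List.range n))
        (fun x => x) true = L0.map pvC := by
      rw [hL0]
      have hmap : List.map (fun x => dv.getD x 0 * (x : Int)) (List.range n)
          = List.map pvC (List.map G (List.range n)) := by rw [List.map_map]; rfl
      rw [hmap, ← pvBridge ((List.range n).map G)]
    rw [hcost]
    have hB := pvEnumB n (L0.map pvC) 0 ((n : Int) * pvSumF L0) (by simp [hlenL0])
    simp only [Nat.cast_zero, Nat.sub_zero] at hB
    rw [hB]
    simp [pvSumF, pvOff]
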